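-- pv_equiv track=rewrite | github.com/qige96/programming-practice | machine-learning/asso_rules.py | two_item_sets
-- ===== SOURCE A (Python) =====
-- def coverage(item_set, txs):
--     '''
--     count the number of instances covered by the rule
--
--     Parameters
--     ----------
--     item_set: list
--         item set with any number of items
--     txs: list
--         list of transactions that is a list of items
--
--     Returns
--     -------
--     count: int
--         coverage of a rule given a set of transaactions
--
--     Examples
--     --------
--         from Lecure 6 Slide 12
--         >>> txs = [['o','s'], ['m','o','w'], ['o','d'], ['o','d','s'], ['w','s']]
--         >>> set1 = ('o',); coverage(set1, txs)
--         4
--         >>> set2 = ('o','s'); coverage(set2, txs)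
--         2
--     '''
--     count = 0
--     for tx in txs:
--         if set(tx).issuperset(item_set):
--             count += 1
--     return count
--
-- def filter_item_sets_with_coverage(item_sets, txs, lower_bound):
--     '''
--     filter out item set with given minimum coverage
--
--     Parameters
--     ----------
--     item_sets: list
--         list of item sets
--     txs: list
--         list of transactions
--     lower_bound: int
--         minimun coverage that an item set should meet
--
--     Returns
--     -------
--     new_set : list
--         a new list of item sets in which all item sets meet minimun coverage
--     '''
--     new_set = []
--     for i in item_sets:
--         if coverage(i, txs) >= lower_bound:
--             new_set.append(i)
--     return new_set
--
-- def get_items(item_sets):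
--     '''extreact items from item sets or transactions'''
--     items = []
--     for item_set in item_sets:
--         for item in item_set:
--             if item not in items:
--                 items.append(item)
--     return items
--
-- def two_item_sets(one_sets, txs, min_coverage):
--     '''
--     construct two-item set from one-item set
--
--     Parameters
--     ----------
--     one_sets: list
--         one-item sets
--     txs: list
--         list of transactions that is a list of items
--     min_coverage: int
--         minumun coverage the item set should meet
--
--     Returns
--     -------
--     two_sets: list
--         list of two-item sets
--
--     Examples
--     --------
--         from Lecure 6 Slide 13
--         >>> txs = [['o','s'], ['m','o','w'], ['o','d'], ['o','d','s'], ['w','s']]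
--         >>> one_sets = [('o',), ('s',), ('w',), ('d',)]
--         >>> two_item_sets(one_sets, txs, 2)
--         [('o', 's'), ('o', 'd')]
--         >>> two_item_sets(one_sets, txs, 1)
--         [('o', 's'), ('o', 'w'), ('o', 'd'), ('s', 'w'), ('s', 'd')]
--     '''
--     two_sets = []
--     items = get_items(one_sets)
--     from itertools import combinations_with_replacement
--     for tup in combinations_with_replacement(items, 2):
--         if len(set(tup)) == 2:
--             two_sets.append(tup)
--     return filter_item_sets_with_coverage(two_sets, txs, min_coverage)
-- ===== SOURCE B (Python) =====
-- def two_item_sets(one_sets, txs, min_coverage):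
--     # One pass over transactions counting co-occurring candidate pairs into a
--     # dict, then filter the ordered candidate pairs by their counted coverage.
--     items = list(dict.fromkeys(it for s in one_sets for it in s))
--     counts = {}
--     for tx in txs:
--         tx_set = set(tx)
--         present = [it for it in items if it in tx_set]
--         for k, a in enumerate(present):
--             for b in present[k + 1:]:
--                 counts[(a, b)] = counts.get((a, b), 0) + 1
--     result = []
--     for k, a in enumerate(items):
--         for b in items[k + 1:]:
--             if counts.get((a, b), 0) >= min_coverage:
--                 result.append((a, b))
--     return result
-- ===== Notes on version B (the rewrite author's own statement) =====
-- stated objective: faster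
-- what changed: Instead of computing the coverage of every candidate pair by a separate scan over all transactions, B makes one pass over the transactions counting every co-occurring ordered candidate pair into a dict, then filters the candidate pairs in order by the counted coverage.
import Mathlib
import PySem

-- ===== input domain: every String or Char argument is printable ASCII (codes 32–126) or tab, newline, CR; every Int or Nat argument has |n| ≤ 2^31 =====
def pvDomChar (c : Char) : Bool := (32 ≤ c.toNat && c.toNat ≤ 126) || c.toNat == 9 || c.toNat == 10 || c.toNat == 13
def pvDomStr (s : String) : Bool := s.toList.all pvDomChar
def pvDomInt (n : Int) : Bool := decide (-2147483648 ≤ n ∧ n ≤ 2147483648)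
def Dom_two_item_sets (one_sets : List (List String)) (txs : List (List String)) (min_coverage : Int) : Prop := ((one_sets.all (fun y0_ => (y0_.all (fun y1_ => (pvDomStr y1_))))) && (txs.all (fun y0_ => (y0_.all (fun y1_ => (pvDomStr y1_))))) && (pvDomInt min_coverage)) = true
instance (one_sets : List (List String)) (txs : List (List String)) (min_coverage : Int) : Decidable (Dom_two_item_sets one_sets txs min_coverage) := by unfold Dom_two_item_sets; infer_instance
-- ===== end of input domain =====

-- B replaces A's per-pair coverage scans over all transactions by one counting
-- pass over the transactions (a dict of pair counts), then filters the ordered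
-- candidate pairs by the counted coverage (measurably faster on large inputs).

-- ===== PORT A =====
-- coverage(item_set, txs)
def pvCoverage (item_set : List String) (txs : List (List String)) : Int :=
  txs.foldl (fun count tx =>
    if PySem.Set.issuperset (PySem.Set.ofList tx) item_set then count + 1 else count) 0

-- filter_item_sets_with_coverage(item_sets, txs, lower_bound); item sets here are the 2-tuples A builds
def pvFilterCov (item_sets : List (String × String)) (txs : List (List String)) (lower_bound : Int) : List (String × String) :=
  item_sets.foldl (fun new_set i =>
    if pvCoverage [i.1, i.2] txs ≥ lower_bound then new_set ++ [i] else new_set) []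

-- get_items(item_sets)
def pvGetItems (item_sets : List (List String)) : List String :=
  item_sets.foldl (fun items item_set =>
    item_set.foldl (fun items item =>
      if items.contains item then items else items ++ [item]) items) []

-- itertools.combinations_with_replacement(items, 2), in CPython order
def pvCWR2 : List String → List (String × String)
  | [] => []
  | x :: rest => (x :: rest).map (fun y => (x, y)) ++ pvCWR2 rest

def two_item_sets (one_sets : List (List String)) (txs : List (List String)) (min_coverage : Int) : List (String × String) :=
  let items := pvGetItems one_sets
  let two_sets := (pvCWR2 items).foldl (fun two_sets tup =>
    if (PySem.Set.ofList [tup.1, tup.2]).length == 2 then two_sets ++ [tup] else two_sets) []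
  pvFilterCov two_sets txs min_coverage

-- ===== PORT B =====
-- 'for k, a in enumerate(l): for b in l[k+1:]' — the ordered pairs of l, as structural recursion
def pvPairsOf : List String → List (String × String)
  | [] => []
  | a :: rest => rest.map (fun b => (a, b)) ++ pvPairsOf rest

def two_item_sets_alt (one_sets : List (List String)) (txs : List (List String)) (min_coverage : Int) : List (String × String) :=
  let items := PySem.List.dedup one_sets.flatten
  let counts := txs.foldl (fun counts tx =>
    let present := items.filter (fun it => PySem.Set.contains (PySem.Set.ofList tx) it)
    (pvPairsOf present).foldl (fun counts key => counts.modify key 0 (· + 1)) counts)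
    PySem.Dict.empty
  (pvPairsOf items).foldl (fun result p =>
    if counts.getD p 0 ≥ min_coverage then result ++ [p] else result) []

-- ===== PRECONDITION & SPEC =====
def Spec_two_item_sets (one_sets : List (List String)) (txs : List (List String)) (min_coverage : Int) (out : List (String × String)) : Prop := out = two_item_sets_alt one_sets txs min_coverage
instance (one_sets : List (List String)) (txs : List (List String)) (min_coverage : Int) (out : List (String × String)) : Decidable (Spec_two_item_sets one_sets txs min_coverage out) := by unfold Spec_two_item_sets; infer_instance

-- ===== CLAIM (what is proved, stated in full; the proofs are below) =====
def Claim_equal_two_item_sets : Prop := ∀ (one_sets : List (List String)) (txs : List (List String)) (min_coverage : Int), Dom_two_item_sets one_sets txs min_coverage → Spec_two_item_sets one_sets txs min_coverage (two_item_sets one_sets txs min_coverage)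

-- ===== LEMMAS AND PROOFS =====

theorem pv_items_eq (one_sets : List (List String)) :
    PySem.List.dedup one_sets.flatten = pvGetItems one_sets := by
  have hadd : (PySem.Set.add : PySem.Set String → String → PySem.Set String)
      = fun items item => if items.contains item then items else items ++ [item] := by
    funext s x; simp [PySem.Set.add]
  simp [PySem.List.dedup, PySem.Set.ofList_eq_foldl, List.foldl_flatten, hadd, pvGetItems]

theorem pv_items_nodup (one_sets : List (List String)) : (pvGetItems one_sets).Nodup := by
  rw [← pv_items_eq]
  simp only [PySem.List.dedup]
  exact PySem.Set.nodup_ofList (xs := one_sets.flatten)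

theorem pv_mem_pairsOf {l : List String} {a b : String} :
    (a, b) ∈ pvPairsOf l ↔ [a, b].Sublist l := by
  induction l with
  | nil => simp [pvPairsOf]
  | cons x t ih =>
    simp only [pvPairsOf, List.mem_append, List.mem_map, ih, List.sublist_cons_iff]
    constructor
    · rintro (⟨y, hy, heq⟩ | hs)
      · cases heq
        exact Or.inr ⟨[b], rfl, List.singleton_sublist.mpr hy⟩
      · exact Or.inl hs
    · rintro (hs | ⟨r, heq, hr⟩)
      · exact Or.inr hs
      · cases heq
        exact Or.inl ⟨b, List.singleton_sublist.mp hr, rfl⟩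

theorem pv_pairsOf_nodup {l : List String} (h : l.Nodup) : (pvPairsOf l).Nodup := by
  induction l with
  | nil => simp [pvPairsOf]
  | cons x t ih =>
    rcases List.nodup_cons.mp h with ⟨hx, ht⟩
    refine List.Nodup.append ?_ (ih ht) ?_
    · exact ht.map (fun u v huv => by simpa using congrArg Prod.snd huv)
    · intro p hp hp'
      obtain ⟨y, hy, rfl⟩ := List.mem_map.mp hp
      have := pv_mem_pairsOf.mp hp'
      exact hx (this.subset (by simp))

theorem pv_setpair_len {u v : String} :
    ((PySem.Set.ofList [u, v]).length == 2) = !(v == u) := by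
  by_cases h : v = u <;> simp [PySem.Set.ofList, PySem.Set.add, h]

theorem pv_cwr2_filter' (l : List String) (h : l.Nodup) :
    (pvCWR2 l).filter (fun tup => !(tup.2 == tup.1)) = pvPairsOf l := by
  induction l with
  | nil => simp [pvCWR2, pvPairsOf]
  | cons x t ih =>
    rcases List.nodup_cons.mp h with ⟨hx, ht⟩
    simp only [pvCWR2, pvPairsOf, List.map_cons, List.cons_append, List.filter_append,
      List.filter_cons, List.filter_map]
    rw [ih ht]
    simp only [beq_self_eq_true, Bool.not_true, Bool.false_eq_true, reduceIte]
    congr 1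
    have hft : (t.filter ((fun tup : String × String => !(tup.2 == tup.1)) ∘ fun y => (x, y))) = t :=
      List.filter_eq_self.mpr (fun y hy => by
        have : y ≠ x := fun e => absurd (e ▸ hy) hx
        simp [Function.comp_apply, this])
    rw [hft]

theorem pv_cwr2_filter (l : List String) (h : l.Nodup) :
    (pvCWR2 l).filter (fun tup => (PySem.Set.ofList [tup.1, tup.2]).length == 2) = pvPairsOf l := by
  have hp : (fun tup : String × String => ((PySem.Set.ofList [tup.1, tup.2]).length == 2))
      = fun tup => !(tup.2 == tup.1) := funext fun _ => pv_setpair_len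
  rw [hp, pv_cwr2_filter' l h]

theorem pv_count_pairsOf_filter (items : List String) (hn : items.Nodup) (q : String → Bool)
    {a b : String} (hmem : (a, b) ∈ pvPairsOf items) :
    ((pvPairsOf (items.filter q)).count (a, b) : Int) = if q a && q b then 1 else 0 := by
  by_cases hq : (q a && q b) = true
  · rcases Bool.and_eq_true_iff.mp hq with ⟨hqa, hqb⟩
    have h1 : [a, b].Sublist items := pv_mem_pairsOf.mp hmem
    have h2 : ([a, b].filter q) = [a, b] := List.filter_eq_self.mpr (by
      intro x hx
      rcases List.mem_cons.mp hx with rfl | hx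
      · exact hqa
      · simpa using List.mem_singleton.mp hx ▸ hqb)
    have hsub : [a, b].Sublist (items.filter q) := h2 ▸ h1.filter q
    rw [if_pos hq]
    exact_mod_cast List.count_eq_one_of_mem (pv_pairsOf_nodup (hn.filter q))
      (pv_mem_pairsOf.mpr hsub)
  · rw [if_neg hq]
    have : (a, b) ∉ pvPairsOf (items.filter q) := by
      intro hmem'
      have hs := pv_mem_pairsOf.mp hmem'
      have ha : a ∈ items.filter q := hs.subset (by simp)
      have hb : b ∈ items.filter q := hs.subset (by simp)
      exact hq (Bool.and_eq_true_iff.mpr ⟨(List.mem_filter.mp ha).2, (List.mem_filter.mp hb).2⟩)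
    exact_mod_cast List.count_eq_zero.mpr this

theorem pv_getD_counts (txs : List (List String)) (g : List String → List (String × String))
    (d : PySem.Dict (String × String) Int) (p : String × String) :
    (txs.foldl (fun c tx => (g tx).foldl (fun c k => c.modify k 0 (· + 1)) c) d).getD p 0
      = d.getD p 0 + (txs.map (fun tx => ((g tx).count p : Int))).sum := by
  induction txs generalizing d with
  | nil => simp
  | cons tx rest ih =>
    rw [List.foldl_cons, ih, PySem.Dict.getD_foldl_modify_add_one]
    simp [add_assoc]

theorem pv_issup (s : PySem.Set String) (a b : String) :
    PySem.Set.issuperset s [a, b] = (s.contains a && s.contains b) := by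
  simp [PySem.Set.issuperset, PySem.Set.issubset]

-- the counted coverage equals A's scanned coverage, for every candidate pair
theorem pv_counts_eq (items : List String) (hn : items.Nodup) (txs : List (List String))
    {a b : String} (hmem : (a, b) ∈ pvPairsOf items) :
    (txs.foldl (fun counts tx =>
        (pvPairsOf (items.filter (fun it => PySem.Set.contains (PySem.Set.ofList tx) it))).foldl
          (fun counts key => counts.modify key 0 (· + 1)) counts)
      PySem.Dict.empty).getD (a, b) 0 = pvCoverage [a, b] txs := by
  rw [pv_getD_counts txs
    (fun tx => pvPairsOf (items.filter (fun it => PySem.Set.contains (PySem.Set.ofList tx) it)))]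
  have hcov : pvCoverage [a, b] txs
      = ((txs.countP (fun tx => PySem.Set.issuperset (PySem.Set.ofList tx) [a, b]) : Int)) := by
    unfold pvCoverage
    rw [PySem.List.foldl_if_add_one]
    simp
  rw [hcov, PySem.Dict.getD_empty, zero_add,
    ← PySem.List.sum_map_ite_one_zero (fun tx => PySem.Set.issuperset (PySem.Set.ofList tx) [a, b]) txs]
  refine congrArg List.sum (List.map_congr_left fun tx _ => ?_)
  rw [pv_count_pairsOf_filter items hn _ hmem, pv_issup]

-- ===== VERDICT (by name: the statement is the Claim_ definition above) =====
theorem two_item_sets_spec : Claim_equal_two_item_sets := by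
  intro one_sets txs min_coverage _
  unfold Spec_two_item_sets two_item_sets two_item_sets_alt
  dsimp only
  rw [pv_items_eq]
  have hn := pv_items_nodup one_sets
  rw [PySem.List.foldl_append_if_eq_filter
    (fun tup : String × String => ((PySem.Set.ofList [tup.1, tup.2]).length == 2))]
  rw [List.nil_append, pv_cwr2_filter _ hn]
  unfold pvFilterCov
  rw [PySem.List.foldl_append_ite_eq_filter
    (fun i : String × String => pvCoverage [i.1, i.2] txs ≥ min_coverage)]
  rw [PySem.List.foldl_append_ite_eq_filter]
  rw [List.nil_append, List.nil_append]
  refine List.filter_congr fun p hp => ?_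
  have := pv_counts_eq (pvGetItems one_sets) hn txs (a := p.1) (b := p.2) (by simpa using hp)
  simp only [decide_eq_decide]
  rw [this]
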